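-- pv_equiv track=rewrite | github.com/jaykim-github/StudyingAlgorithm | excersicecloth.py | solution
-- ===== SOURCE A (Python) =====
-- def solution(n, lost, reserve):
--     answer = 0
--     num = 0
--     lost = sorted(lost)
--     reserve = sorted(reserve)
--
--     common = set(lost).intersection(reserve) #lost,reserve 간 중복 요소 구하기
--     for u in common :
--         reserve.remove(u)
--         lost.remove(u)
--
--     for i in lost :
--         if i-1 in reserve:
--             num += 1
--             reserve.remove(i-1)
--         elif i+1 in reserve :
--             num += 1
--             reserve.remove(i+1)
--
--     answer = n - len(lost) + num
--
--     return answer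
-- ===== SOURCE B (Python) =====
-- def solution(n, lost, reserve):
--     # Batched counting sweep: tally lost/reserve per value, cancel common values
--     # arithmetically, then handle each distinct lost value as one min() batch.
--     L = {}
--     for x in lost:
--         L[x] = L.get(x, 0) + 1
--     R = {}
--     for x in reserve:
--         R[x] = R.get(x, 0) + 1
--     for v in set(L) & set(R):
--         L[v] -= 1
--         R[v] -= 1
--     num = 0
--     survivors = 0
--     for v in sorted(L):
--         k = L[v]
--         t = min(k, R.get(v - 1, 0))
--         R[v - 1] = R.get(v - 1, 0) - t
--         t2 = min(k - t, R.get(v + 1, 0))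
--         R[v + 1] = R.get(v + 1, 0) - t2
--         num += t + t2
--         survivors += k
--     return n - survivors + num
-- ===== Notes on version B (the rewrite author's own statement) =====
-- stated objective: faster
-- what changed: Replaces A's per-item greedy (set-intersection, then for each lost item a membership scan and list.remove on the reserve list) by a batched counting sweep: tally lost and reserve per value, cancel common values arithmetically, then process each DISTINCT lost value once with closed-form min() arithmetic (t = min(k, R[v-1]); t2 = min(k-t, R[v+1])) instead of item-by-item matching.
import Mathlib
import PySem

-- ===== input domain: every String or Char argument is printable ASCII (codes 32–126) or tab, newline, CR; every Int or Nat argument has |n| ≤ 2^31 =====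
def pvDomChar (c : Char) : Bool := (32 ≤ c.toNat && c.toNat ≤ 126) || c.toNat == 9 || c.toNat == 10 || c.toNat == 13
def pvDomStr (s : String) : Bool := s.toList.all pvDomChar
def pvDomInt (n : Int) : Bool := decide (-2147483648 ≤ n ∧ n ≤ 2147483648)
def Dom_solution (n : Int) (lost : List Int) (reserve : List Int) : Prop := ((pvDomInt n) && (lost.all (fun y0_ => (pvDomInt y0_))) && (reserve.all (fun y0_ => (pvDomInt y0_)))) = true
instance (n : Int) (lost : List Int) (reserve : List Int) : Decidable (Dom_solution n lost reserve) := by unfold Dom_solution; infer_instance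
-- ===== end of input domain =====

-- B replaces A's per-item greedy matching (set intersection + repeated membership scans
-- and list.remove) by a batched counting sweep: per-value tallies, arithmetic cancellation
-- of common values, and one closed-form min() step per distinct lost value (objective: faster).

-- ===== PORT A =====
-- list.remove(u) after/under a membership guard: total form of PySem.List.remove?
def eraseStep (l : List Int) (u : Int) : List Int := (PySem.List.remove? l u).getD l

-- the body of A's second loop ('for i in lost: …'), state = (num, reserve)
def aStep2 (p : Int × List Int) (i : Int) : Int × List Int :=
  if p.2.contains (i - 1) then (p.1 + 1, eraseStep p.2 (i - 1))
  else if p.2.contains (i + 1) then (p.1 + 1, eraseStep p.2 (i + 1))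
  else p

def solution (n : Int) (lost : List Int) (reserve : List Int) : Int :=
  let lost1 := PySem.List.sorted lost (fun x => x)
  let reserve1 := PySem.List.sorted reserve (fun x => x)
  -- common = set(lost).intersection(reserve); the loop over it removes one occurrence of each
  -- common value from each list — order-independent, so the set's iteration order is immaterial
  let common : PySem.Set Int := PySem.Set.inter (PySem.Set.ofList lost1) reserve1
  let p1 := common.foldl
    (fun (p : List Int × List Int) u => (eraseStep p.1 u, eraseStep p.2 u)) (lost1, reserve1)
  let p2 := p1.1.foldl aStep2 ((0 : Int), p1.2)
  n - p1.1.length + p2.1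

-- ===== PORT B =====
-- the body of B's sweep over the sorted distinct lost values, state = (num, survivors, R)
def bGo (L1 : PySem.Dict Int Int) (st : Int × Int × PySem.Dict Int Int) (v : Int) :
    Int × Int × PySem.Dict Int Int :=
  let k := L1.getD v 0
  let t := min k (st.2.2.getD (v - 1) 0)
  let r1 := st.2.2.insert (v - 1) (st.2.2.getD (v - 1) 0 - t)
  let t2 := min (k - t) (r1.getD (v + 1) 0)
  let r2 := r1.insert (v + 1) (r1.getD (v + 1) 0 - t2)
  (st.1 + t + t2, st.2.1 + k, r2)

def solution_alt (n : Int) (lost : List Int) (reserve : List Int) : Int :=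
  let L : PySem.Dict Int Int :=
    lost.foldl (fun d x => d.insert x (d.getD x 0 + 1)) PySem.Dict.empty
  let R : PySem.Dict Int Int :=
    reserve.foldl (fun d x => d.insert x (d.getD x 0 + 1)) PySem.Dict.empty
  -- 'for v in set(L) & set(R): L[v] -= 1; R[v] -= 1' — decrements at distinct keys,
  -- order-independent, so the set's iteration order is immaterial
  let common : PySem.Set Int := PySem.Set.inter (PySem.Set.ofList L.keys) R.keys
  let p := common.foldl
    (fun (p : PySem.Dict Int Int × PySem.Dict Int Int) v =>
      (p.1.insert v (p.1.getD v 0 - 1), p.2.insert v (p.2.getD v 0 - 1))) (L, R)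
  let st := (PySem.List.sorted p.1.keys (fun x => x)).foldl (bGo p.1) ((0 : Int), (0 : Int), p.2)
  n - st.2.1 + st.1

-- ===== PRECONDITION & SPEC =====
def Spec_solution (n : Int) (lost : List Int) (reserve : List Int) (out : Int) : Prop := out = solution_alt n lost reserve
instance (n : Int) (lost : List Int) (reserve : List Int) (out : Int) : Decidable (Spec_solution n lost reserve out) := by unfold Spec_solution; infer_instance

-- ===== CLAIM (what is proved, stated in full; the proofs are below) =====
def Claim_equal_solution : Prop := ∀ (n : Int) (lost : List Int) (reserve : List Int), Dom_solution n lost reserve → Spec_solution n lost reserve (solution n lost reserve)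

-- ===== LEMMAS AND PROOFS =====

-- proof-side intermediate: A's per-item matching step on a COUNT DICT instead of a list
def bStep2 (p : Int × PySem.Dict Int Int) (i : Int) : Int × PySem.Dict Int Int :=
  if 0 < p.2.getD (i - 1) 0 then (p.1 + 1, p.2.insert (i - 1) (p.2.getD (i - 1) 0 - 1))
  else if 0 < p.2.getD (i + 1) 0 then (p.1 + 1, p.2.insert (i + 1) (p.2.getD (i + 1) 0 - 1))
  else p

lemma eraseStep_eq (l : List Int) (u : Int) :
    eraseStep l u = if u ∈ l then l.erase u else l := by
  unfold eraseStep
  by_cases h : u ∈ l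
  · rw [PySem.List.remove?_eq_some_erase l u h]; simp [h]
  · rw [(PySem.List.remove?_eq_none_iff l u).mpr h]; simp [h]

lemma foldl_pair_split {α β γ : Type} (cs : List γ) (f : α → γ → α) (g : β → γ → β)
    (a : α) (b : β) :
    cs.foldl (fun p u => (f p.1 u, g p.2 u)) (a, b) = (cs.foldl f a, cs.foldl g b) := by
  induction cs generalizing a b with
  | nil => rfl
  | cons u t ih => simpa using ih (f a u) (g b u)

lemma foldl_erase_sublist (cs S : List Int) : List.Sublist (cs.foldl eraseStep S) S := by
  induction cs generalizing S with
  | nil => simp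
  | cons u t ih =>
    refine List.Sublist.trans (ih (eraseStep S u)) ?_
    rw [eraseStep_eq]
    split
    · exact List.erase_sublist
    · exact List.Sublist.refl S

lemma count_foldl_erase (cs S : List Int) (hnd : cs.Nodup) (v : Int) :
    ((cs.foldl eraseStep S).count v : Int)
      = (S.count v : Int) - (if v ∈ cs ∧ v ∈ S then 1 else 0) := by
  induction cs generalizing S with
  | nil => simp
  | cons u t ih =>
    have hnd' : t.Nodup := hnd.of_cons
    have hu : u ∉ t := (List.nodup_cons.mp hnd).1
    rw [List.foldl_cons, ih _ hnd', eraseStep_eq]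
    by_cases hv : v = u
    · subst hv
      have hvt : v ∉ t := hu
      by_cases hS : v ∈ S
      · have h1 : 1 ≤ S.count v := List.one_le_count_iff.mpr hS
        have hn : ¬ (v ∈ t ∧ v ∈ S.erase v) := fun h => hvt h.1
        rw [if_pos hS, if_neg hn, if_pos ⟨List.mem_cons_self, hS⟩, List.count_erase_self]
        omega
      · simp [hS, hvt]
    · by_cases hS : u ∈ S
      · have hmem : v ∈ S.erase u ↔ v ∈ S := by
          constructor
          · exact fun h => List.mem_of_mem_erase h
          · exact fun h => (List.mem_erase_of_ne hv).mpr h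
        have hcnt : (S.erase u).count v = S.count v := List.count_erase_of_ne hv
        simp [hS, hcnt, hmem, hv]
      · simp [hS, hv]

lemma pairwise_foldl_erase (cs S : List Int) (h : S.Pairwise (· ≤ ·)) :
    (cs.foldl eraseStep S).Pairwise (· ≤ ·) :=
  List.Pairwise.sublist (foldl_erase_sublist cs S) h

-- A's borrowing pass num equals the per-item dict simulation whenever the dict counts the list
lemma phase2 (L : List Int) (num : Int) (r : List Int) (d : PySem.Dict Int Int)
    (h : ∀ v, (r.count v : Int) = d.getD v 0) :
    (L.foldl aStep2 (num, r)).1 = (L.foldl bStep2 (num, d)).1 := by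
  induction L generalizing num r d with
  | nil => rfl
  | cons i t ih =>
    rw [List.foldl_cons, List.foldl_cons]
    have hcont : ∀ w : Int, r.contains w = true ↔ 0 < d.getD w 0 := by
      intro w
      rw [List.contains_iff_mem, ← List.one_le_count_iff]
      constructor
      · intro hm; have := h w; omega
      · intro hm; have := h w; omega
    have herase : ∀ w : Int, 0 < d.getD w 0 →
        ∀ v, ((eraseStep r w).count v : Int)
          = (d.insert w (d.getD w 0 - 1)).getD v 0 := by
      intro w hw v
      have hmem : w ∈ r := by
        rw [← List.one_le_count_iff]; have := h w; omega
      rw [eraseStep_eq, if_pos hmem, PySem.Dict.getD_insert]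
      by_cases hv : v = w
      · subst hv
        have h1 : 1 ≤ r.count v := List.one_le_count_iff.mpr hmem
        rw [List.count_erase_self]
        have := h v
        simp
        omega
      · rw [List.count_erase_of_ne hv, if_neg hv]
        exact h v
    by_cases h1 : r.contains (i - 1)
    · have hd1 : 0 < d.getD (i - 1) 0 := (hcont _).mp h1
      have hA : aStep2 (num, r) i = (num + 1, eraseStep r (i - 1)) := by
        unfold aStep2; rw [if_pos h1]
      have hB : bStep2 (num, d) i = (num + 1, d.insert (i - 1) (d.getD (i - 1) 0 - 1)) := by
        simp [bStep2, hd1]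
      rw [hA, hB]
      exact ih _ _ _ (herase _ hd1)
    · have hd1 : ¬ 0 < d.getD (i - 1) 0 := fun hp => h1 ((hcont _).mpr hp)
      by_cases h2 : r.contains (i + 1)
      · have hd2 : 0 < d.getD (i + 1) 0 := (hcont _).mp h2
        have hA : aStep2 (num, r) i = (num + 1, eraseStep r (i + 1)) := by
          unfold aStep2
          rw [if_neg (by simpa using h1), if_pos h2]
        have hB : bStep2 (num, d) i = (num + 1, d.insert (i + 1) (d.getD (i + 1) 0 - 1)) := by
          simp [bStep2, hd1, hd2]
        rw [hA, hB]
        exact ih _ _ _ (herase _ hd2)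
      · have hd2 : ¬ 0 < d.getD (i + 1) 0 := fun hp => h2 ((hcont _).mpr hp)
        have hA : aStep2 (num, r) i = (num, r) := by
          unfold aStep2
          rw [if_neg (by simpa using h1), if_neg (by simpa using h2)]
        have hB : bStep2 (num, d) i = (num, d) := by
          simp [bStep2, hd1, hd2]
        rw [hA, hB]
        exact ih _ _ _ h

-- getD after B's cancellation fold: one decrement per value of the (nodup) common list
lemma getD_foldl_dec (cs : List Int) (hnd : cs.Nodup) (d : PySem.Dict Int Int) (w : Int) :
    (cs.foldl (fun d v => d.insert v (d.getD v 0 - 1)) d).getD w 0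
      = d.getD w 0 - (if w ∈ cs then 1 else 0) := by
  induction cs generalizing d with
  | nil => simp
  | cons u t ih =>
    have hu : u ∉ t := (List.nodup_cons.mp hnd).1
    rw [List.foldl_cons, ih hnd.of_cons, PySem.Dict.getD_insert]
    by_cases hw : w = u
    · subst hw; simp [hu]
    · simp [hw]

-- the per-item dict simulation over a constant block 'replicate k v', in closed form
lemma batch (k : Nat) (v num : Int) (d : PySem.Dict Int Int)
    (hnn : ∀ w, 0 ≤ d.getD w 0) :
    ((List.replicate k v).foldl bStep2 (num, d)).1
        = num + min (k : Int) (d.getD (v - 1) 0)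
            + min ((k : Int) - min (k : Int) (d.getD (v - 1) 0)) (d.getD (v + 1) 0)
    ∧ (∀ w, ((List.replicate k v).foldl bStep2 (num, d)).2.getD w 0
        = if w = v - 1 then d.getD (v - 1) 0 - min (k : Int) (d.getD (v - 1) 0)
          else if w = v + 1 then
            d.getD (v + 1) 0
              - min ((k : Int) - min (k : Int) (d.getD (v - 1) 0)) (d.getD (v + 1) 0)
          else d.getD w 0) := by
  induction k generalizing num d with
  | zero =>
    have h1 := hnn (v - 1)
    have h2 := hnn (v + 1)
    rw [List.replicate_zero]
    refine ⟨by simp only [List.foldl_nil]; push_cast; omega, fun w => ?_⟩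
    simp only [List.foldl_nil]
    split_ifs with hw1 hw2
    · subst hw1; push_cast; omega
    · subst hw2; push_cast; omega
    · rfl
  | succ m ih =>
    have hne : (v - 1 : Int) ≠ v + 1 := by omega
    rw [List.replicate_succ, List.foldl_cons]
    have h1 := hnn (v - 1)
    have h2 := hnn (v + 1)
    by_cases hc1 : 0 < d.getD (v - 1) 0
    · have hstep : bStep2 (num, d) v
          = (num + 1, d.insert (v - 1) (d.getD (v - 1) 0 - 1)) := by
        simp [bStep2, hc1]
      rw [hstep]
      have hnn' : ∀ w, 0 ≤ (d.insert (v - 1) (d.getD (v - 1) 0 - 1)).getD w 0 := by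
        intro w
        rw [PySem.Dict.getD_insert]
        split_ifs with hw
        · omega
        · exact hnn w
      obtain ⟨i1, i2⟩ := ih (num + 1) _ hnn'
      have e1 : (d.insert (v - 1) (d.getD (v - 1) 0 - 1)).getD (v - 1) 0
          = d.getD (v - 1) 0 - 1 := by rw [PySem.Dict.getD_insert]; simp
      have e2 : (d.insert (v - 1) (d.getD (v - 1) 0 - 1)).getD (v + 1) 0
          = d.getD (v + 1) 0 := by rw [PySem.Dict.getD_insert]; simp [Ne.symm hne]
      constructor
      · rw [i1, e1, e2]; push_cast; omega
      · intro w
        rw [i2 w, e1, e2]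
        split_ifs with hw1 hw2
        · push_cast; omega
        · push_cast; omega
        · rw [PySem.Dict.getD_insert, if_neg hw1]
    · by_cases hc2 : 0 < d.getD (v + 1) 0
      · have hstep : bStep2 (num, d) v
            = (num + 1, d.insert (v + 1) (d.getD (v + 1) 0 - 1)) := by
          simp [bStep2, hc1, hc2]
        rw [hstep]
        have hnn' : ∀ w, 0 ≤ (d.insert (v + 1) (d.getD (v + 1) 0 - 1)).getD w 0 := by
          intro w
          rw [PySem.Dict.getD_insert]
          split_ifs with hw
          · omega
          · exact hnn w
        obtain ⟨i1, i2⟩ := ih (num + 1) _ hnn'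
        have e1 : (d.insert (v + 1) (d.getD (v + 1) 0 - 1)).getD (v - 1) 0
            = d.getD (v - 1) 0 := by rw [PySem.Dict.getD_insert]; simp [hne]
        have e2 : (d.insert (v + 1) (d.getD (v + 1) 0 - 1)).getD (v + 1) 0
            = d.getD (v + 1) 0 - 1 := by rw [PySem.Dict.getD_insert]; simp
        constructor
        · rw [i1, e1, e2]; push_cast; omega
        · intro w
          rw [i2 w, e1, e2]
          split_ifs with hw1 hw2
          · push_cast; omega
          · push_cast; omega
          · rw [PySem.Dict.getD_insert, if_neg hw2]
      · have hstep : bStep2 (num, d) v = (num, d) := by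
          simp [bStep2, hc1, hc2]
        rw [hstep]
        obtain ⟨i1, i2⟩ := ih num d hnn
        constructor
        · rw [i1]; push_cast; omega
        · intro w
          rw [i2 w]
          split_ifs with hw1 hw2
          · push_cast; omega
          · push_cast; omega
          · rfl

-- B's sweep over the distinct values equals the per-item dict simulation over the block list
lemma sweep (L1 : PySem.Dict Int Int) (D : List Int) (num surv : Int)
    (d e : PySem.Dict Int Int)
    (hde : ∀ w, e.getD w 0 = d.getD w 0)
    (hnn : ∀ w, 0 ≤ d.getD w 0)
    (hk : ∀ v ∈ D, 0 ≤ L1.getD v 0) :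
    ((D.flatMap (fun v => List.replicate (L1.getD v 0).toNat v)).foldl bStep2 (num, d)).1
      = (D.foldl (bGo L1) (num, surv, e)).1 := by
  induction D generalizing num surv d e with
  | nil => rfl
  | cons v t ih =>
    rw [List.flatMap_cons, List.foldl_append, List.foldl_cons]
    have hkv : 0 ≤ L1.getD v 0 := hk v List.mem_cons_self
    set k : Int := L1.getD v 0 with hkdef
    have hkcast : ((k.toNat : Nat) : Int) = k := Int.toNat_of_nonneg hkv
    obtain ⟨i1, i2⟩ := batch k.toNat v num d hnn
    rw [hkcast] at i1 i2
    -- the B step, unfolded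
    have hge1 : e.getD (v - 1) 0 = d.getD (v - 1) 0 := hde (v - 1)
    have hne : (v - 1 : Int) ≠ v + 1 := by omega
    set t1 : Int := min k (d.getD (v - 1) 0) with ht1
    set t2 : Int := min (k - t1) (d.getD (v + 1) 0) with ht2
    have hr1 : (e.insert (v - 1) (d.getD (v - 1) 0 - t1)).getD (v + 1) 0
        = d.getD (v + 1) 0 := by
      rw [PySem.Dict.getD_insert]; simp [Ne.symm hne, hde (v + 1)]
    have hBstep : bGo L1 (num, surv, e) v
        = (num + t1 + t2, surv + k,
           (e.insert (v - 1) (d.getD (v - 1) 0 - t1)).insert (v + 1) (d.getD (v + 1) 0 - t2)) := by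
      simp only [bGo, ← hkdef, hge1, ← ht1, hr1, ← ht2]
    rw [hBstep]
    -- prepare the IH for the tail
    set dmid := ((List.replicate k.toNat v).foldl bStep2 (num, d)).2 with hdmid
    have hfold : (List.replicate k.toNat v).foldl bStep2 (num, d) = (num + t1 + t2, dmid) := by
      rw [hdmid]
      exact Prod.ext (by rw [i1]) rfl
    rw [hfold]
    have hnn' : ∀ w, 0 ≤ dmid.getD w 0 := by
      intro w
      rw [hdmid, i2 w]
      split_ifs with hw1 hw2
      · have := hnn (v - 1); omega
      · have := hnn (v + 1); omega
      · exact hnn w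
    have hde' : ∀ w,
        (((e.insert (v - 1) (d.getD (v - 1) 0 - t1)).insert (v + 1)
            (d.getD (v + 1) 0 - t2)).getD w 0)
        = dmid.getD w 0 := by
      intro w
      rw [hdmid, i2 w, PySem.Dict.getD_insert, PySem.Dict.getD_insert]
      by_cases hw2 : w = v + 1
      · subst hw2; simp [Ne.symm hne]
      · by_cases hw1 : w = v - 1
        · subst hw1; simp [hne]
        · simp [hw1, hw2, hde w]
    exact ih _ _ _ _ hde' hnn' (fun w hw => hk w (List.mem_cons_of_mem _ hw))

-- the survivors accumulator of B's sweep
lemma sweep_surv (L1 : PySem.Dict Int Int) (D : List Int) (st : Int × Int × PySem.Dict Int Int) :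
    (D.foldl (bGo L1) st).2.1 = st.2.1 + (D.map (fun v => L1.getD v 0)).sum := by
  induction D generalizing st with
  | nil => simp
  | cons v t ih =>
    rw [List.foldl_cons, List.map_cons, List.sum_cons, ih]
    simp only [bGo]
    ring

-- counts of a flatMap of replicates over a nodup spine
lemma count_flatMap_replicate (D : List Int) (hnd : D.Nodup) (f : Int → Nat) (w : Int) :
    (D.flatMap (fun v => List.replicate (f v) v)).count w
      = if w ∈ D then f w else 0 := by
  induction D with
  | nil => simp
  | cons v t ih =>
    have hu : v ∉ t := (List.nodup_cons.mp hnd).1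
    rw [List.flatMap_cons, List.count_append, ih hnd.of_cons]
    by_cases hw : w = v
    · subst hw; simp [hu]
    · have h0 : List.count w (List.replicate (f v) v) = 0 :=
        List.count_eq_zero.mpr (fun hmem => hw (List.eq_of_mem_replicate hmem))
      simp [h0, hw]

lemma pairwise_flatMap_replicate (D : List Int) (f : Int → Nat)
    (h : D.Pairwise (· ≤ ·)) :
    (D.flatMap (fun v => List.replicate (f v) v)).Pairwise (· ≤ ·) := by
  induction D with
  | nil => simp
  | cons v t ih =>
    rw [List.flatMap_cons]
    rw [List.pairwise_cons] at h
    apply List.pairwise_append.mpr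
    refine ⟨List.pairwise_replicate.mpr (Or.inr le_rfl), ih h.2, ?_⟩
    intro a ha b hb
    rw [List.eq_of_mem_replicate ha]
    obtain ⟨u, hu, hbu⟩ := List.mem_flatMap.mp hb
    rw [List.eq_of_mem_replicate hbu]
    exact h.1 u hu

lemma length_flatMap_replicate (D : List Int) (f : Int → Nat) :
    (D.flatMap (fun v => List.replicate (f v) v)).length = (D.map f).sum := by
  induction D with
  | nil => rfl
  | cons v t ih => simp [List.flatMap_cons, ih]

-- updating a set with elements it already contains changes nothing
lemma set_update_of_mem (s : List Int) (xs : List Int) (h : ∀ v ∈ xs, v ∈ s) :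
    PySem.Set.update s xs = s := by
  induction xs generalizing s with
  | nil => rfl
  | cons u t ih =>
    have he : PySem.Set.update s (u :: t) = PySem.Set.update (PySem.Set.add s u) t := rfl
    rw [he, PySem.Set.add_of_mem (h u List.mem_cons_self)]
    exact ih s (fun v hv => h v (List.mem_cons_of_mem _ hv))

lemma main_eq (n : Int) (lost : List Int) (reserve : List Int) :
    solution n lost reserve = solution_alt n lost reserve := by
  simp only [solution, solution_alt]
  rw [foldl_pair_split, foldl_pair_split _
    (fun (d : PySem.Dict Int Int) (v : Int) => d.insert v (d.getD v 0 - 1))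
    (fun (d : PySem.Dict Int Int) (v : Int) => d.insert v (d.getD v 0 - 1))]
  -- names for A's data
  set S := PySem.List.sorted lost (fun x => x) false with hSdef
  set R0 := PySem.List.sorted reserve (fun x => x) false with hR0def
  set csA : PySem.Set Int := PySem.Set.inter (PySem.Set.ofList S) R0 with hcsAdef
  -- names for B's data
  set L : PySem.Dict Int Int :=
    lost.foldl (fun d x => d.insert x (d.getD x 0 + 1)) PySem.Dict.empty with hLdef
  set R : PySem.Dict Int Int :=
    reserve.foldl (fun d x => d.insert x (d.getD x 0 + 1)) PySem.Dict.empty with hRdef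
  set csB : PySem.Set Int := PySem.Set.inter (PySem.Set.ofList L.keys) R.keys with hcsBdef
  set L1 := csB.foldl (fun d v => d.insert v (d.getD v 0 - 1)) L with hL1def
  set R1 := csB.foldl (fun d v => d.insert v (d.getD v 0 - 1)) R with hR1def
  -- counter facts
  have hLc : L = PySem.Dict.counter lost := PySem.Dict.foldl_insert_getD_add_one_eq_counter lost
  have hRc : R = PySem.Dict.counter reserve := PySem.Dict.foldl_insert_getD_add_one_eq_counter reserve
  have hLkeys : L.keys = PySem.Set.ofList lost := by rw [hLc, PySem.Dict.keys_counter]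
  have hRkeys : R.keys = PySem.Set.ofList reserve := by rw [hRc, PySem.Dict.keys_counter]
  have hLget : ∀ v, L.getD v 0 = (lost.count v : Int) := by
    intro v; rw [hLc, PySem.Dict.getD_counter]
  have hRget : ∀ v, R.getD v 0 = (reserve.count v : Int) := by
    intro v; rw [hRc, PySem.Dict.getD_counter]
  -- both common sets have the same membership
  have hmemS : ∀ v : Int, v ∈ S ↔ v ∈ lost := fun v => PySem.List.mem_sorted lost _ _ v
  have hmemR0 : ∀ v : Int, v ∈ R0 ↔ v ∈ reserve := fun v => PySem.List.mem_sorted reserve _ _ v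
  have hmemA : ∀ v : Int, v ∈ csA ↔ v ∈ lost ∧ v ∈ reserve := by
    intro v
    rw [hcsAdef, PySem.Set.mem_inter, PySem.Set.mem_ofList, hmemS, hmemR0]
  have hmemB : ∀ v : Int, v ∈ csB ↔ v ∈ lost ∧ v ∈ reserve := by
    intro v
    rw [hcsBdef, PySem.Set.mem_inter, PySem.Set.mem_ofList, hLkeys, hRkeys,
      PySem.Set.mem_ofList, PySem.Set.mem_ofList]
  have hndA : csA.Nodup := PySem.Set.nodup_inter _ _ (PySem.Set.nodup_ofList S)
  have hndB : csB.Nodup := PySem.Set.nodup_inter _ _ (PySem.Set.nodup_ofList L.keys)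
  -- getD of the cancelled dicts
  have hL1get : ∀ v, L1.getD v 0
      = (lost.count v : Int) - (if v ∈ lost ∧ v ∈ reserve then 1 else 0) := by
    intro v
    rw [hL1def, getD_foldl_dec csB hndB L v, hLget v]
    simp only [hmemB v]
  have hR1get : ∀ v, R1.getD v 0
      = (reserve.count v : Int) - (if v ∈ lost ∧ v ∈ reserve then 1 else 0) := by
    intro v
    rw [hR1def, getD_foldl_dec csB hndB R v, hRget v]
    simp only [hmemB v]
  -- counts of A's surviving lists
  have hcntS : ∀ v : Int, S.count v = lost.count v :=
    fun v => (PySem.List.sorted_perm lost _ _).count_eq v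
  have hcntR0 : ∀ v : Int, R0.count v = reserve.count v :=
    fun v => (PySem.List.sorted_perm reserve _ _).count_eq v
  have hS'cnt : ∀ v : Int, ((csA.foldl eraseStep S).count v : Int) = L1.getD v 0 := by
    intro v
    have hiff : (v ∈ csA ∧ v ∈ S) ↔ (v ∈ lost ∧ v ∈ reserve) := by
      rw [hmemA v, hmemS v]; tauto
    rw [count_foldl_erase csA S hndA v, hL1get v, hcntS v]
    simp only [hiff]
  have hR'cnt : ∀ v : Int, ((csA.foldl eraseStep R0).count v : Int) = R1.getD v 0 := by
    intro v
    have hiff : (v ∈ csA ∧ v ∈ R0) ↔ (v ∈ lost ∧ v ∈ reserve) := by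
      rw [hmemA v, hmemR0 v]; tauto
    rw [count_foldl_erase csA R0 hndA v, hR1get v, hcntR0 v]
    simp only [hiff]
  -- the distinct sweep spine
  have hL1keys : L1.keys = L.keys := by
    rw [hL1def, PySem.Dict.keys_foldl_insert]
    refine set_update_of_mem _ _ ?_
    intro v hv
    have h := (PySem.Set.mem_inter _ _ _).mp hv
    rw [PySem.Set.mem_ofList] at h
    exact h.1
  set D := PySem.List.sorted L1.keys (fun x => x) false with hDdef
  have hDnd : D.Nodup := by
    rw [hDdef]
    exact (PySem.List.sorted_perm L1.keys _ _).nodup_iff.mpr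
      (hL1keys ▸ (hLkeys ▸ PySem.Set.nodup_ofList lost))
  have hDpw : D.Pairwise (fun a b : Int => a ≤ b) := PySem.List.sorted_pairwise L1.keys _
  have hDmem : ∀ v : Int, v ∈ D ↔ v ∈ lost := by
    intro v
    rw [hDdef, PySem.List.mem_sorted, hL1keys, hLkeys, PySem.Set.mem_ofList]
  -- A's surviving lost list is the flatMap of replicates over D
  have hknn : ∀ v ∈ D, 0 ≤ L1.getD v 0 := by
    intro v hv
    rw [hL1get v]
    have : v ∈ lost := (hDmem v).mp hv
    have h1 : 1 ≤ lost.count v := List.one_le_count_iff.mpr this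
    split_ifs <;> omega
  have hS'eq : csA.foldl eraseStep S
      = D.flatMap (fun v => List.replicate (L1.getD v 0).toNat v) := by
    have hcnt : ∀ w : Int, (csA.foldl eraseStep S).count w
        = (D.flatMap (fun v => List.replicate (L1.getD v 0).toNat v)).count w := by
      intro w
      rw [count_flatMap_replicate D hDnd _ w]
      by_cases hw : w ∈ D
      · rw [if_pos hw]
        have := hS'cnt w
        have h0 : 0 ≤ L1.getD w 0 := hknn w hw
        omega
      · have hwl : w ∉ lost := fun h => hw ((hDmem w).mpr h)
        have := hS'cnt w
        rw [hL1get w] at this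
        have hc0 : lost.count w = 0 := List.count_eq_zero.mpr hwl
        simp only [if_neg hw]
        have hni : ¬ (w ∈ lost ∧ w ∈ reserve) := fun h => hwl h.1
        rw [hc0] at this
        simp [hni] at this
        omega
    have hpA : (csA.foldl eraseStep S).Pairwise (fun a b : Int => a ≤ b) :=
      pairwise_foldl_erase csA S (PySem.List.sorted_pairwise lost _)
    have hpB : (D.flatMap (fun v => List.replicate (L1.getD v 0).toNat v)).Pairwise
        (fun a b : Int => a ≤ b) :=
      pairwise_flatMap_replicate D _ hDpw
    exact List.Perm.eq_of_pairwise (fun a b _ _ hab hba => le_antisymm hab hba) hpA hpB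
      (List.perm_iff_count.mpr hcnt)
  -- the two num results agree
  have hR'nn : ∀ w, 0 ≤ R1.getD w 0 := by
    intro w; rw [← hR'cnt w]; positivity
  have hnum : ((csA.foldl eraseStep S).foldl aStep2 ((0 : Int), csA.foldl eraseStep R0)).1
      = (D.foldl (bGo L1) ((0 : Int), (0 : Int), R1)).1 := by
    rw [phase2 _ 0 _ R1 hR'cnt, hS'eq]
    exact sweep L1 D 0 0 R1 R1 (fun w => rfl) hR'nn hknn
  -- the lengths/survivors agree
  have hlen : ((csA.foldl eraseStep S).length : Int)
      = (D.foldl (bGo L1) ((0 : Int), (0 : Int), R1)).2.1 := by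
    rw [sweep_surv, hS'eq, length_flatMap_replicate, Nat.cast_list_sum, List.map_map]
    have hmapeq : D.map ((Nat.cast : Nat → Int) ∘ fun v => (L1.getD v 0).toNat)
        = D.map (fun v => L1.getD v 0) :=
      List.map_congr_left (fun v hv => by simp [Int.toNat_of_nonneg (hknn v hv)])
    rw [hmapeq]
    ring
  rw [hnum, hlen]

-- ===== VERDICT (by name: the statement is the Claim_ definition above) =====
theorem solution_spec : Claim_equal_solution := by
  intro n lost reserve _
  show solution n lost reserve = solution_alt n lost reserve
  exact main_eq n lost reserve
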